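-- pv_equiv track=rewrite | github.com/chritzadz/coding_problems | typist.py | typist
-- ===== SOURCE A (Python) =====
-- def typist(s):
--     click = 0
--     capslock_state = False
--     make_list = list(s)
--
--     for letter in make_list:
--         if letter.islower():
--             if capslock_state == False:
--                 click += 1
--             elif capslock_state == True:
--                 click += 2
--                 capslock_state = False
--         elif letter.isupper():
--             if capslock_state == False:
--                 capslock_state = True
--                 click += 2
--             elif capslock_state == True:
--                 click += 1
--
--     return click
-- ===== SOURCE B (Python) =====
-- def typist(s):
--     # Closed form via uppercase runs: each cased letter costs 1 click, and each
--     # maximal run of uppercase letters costs 2 extra toggles (caps on + caps off),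
--     # except the final run saves the trailing toggle-off.
--     up = [c.isupper() for c in s if c.islower() or c.isupper()]
--     upruns = sum(1 for prev, cur in zip([False] + up, up) if cur and not prev)
--     return len(up) + 2 * upruns - (1 if up and up[-1] else 0)
-- ===== Notes on version B (the rewrite author's own statement) =====
-- stated objective: alternative
-- what changed: Replaced A's per-character caps-state machine (running boolean state with +1/+2 branch costs) by a closed-form formula: filter to cased letters, count maximal uppercase runs via a zip with the shifted list, and return #cased + 2*#upper_runs minus 1 if the string ends uppercase.
import Mathlib
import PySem

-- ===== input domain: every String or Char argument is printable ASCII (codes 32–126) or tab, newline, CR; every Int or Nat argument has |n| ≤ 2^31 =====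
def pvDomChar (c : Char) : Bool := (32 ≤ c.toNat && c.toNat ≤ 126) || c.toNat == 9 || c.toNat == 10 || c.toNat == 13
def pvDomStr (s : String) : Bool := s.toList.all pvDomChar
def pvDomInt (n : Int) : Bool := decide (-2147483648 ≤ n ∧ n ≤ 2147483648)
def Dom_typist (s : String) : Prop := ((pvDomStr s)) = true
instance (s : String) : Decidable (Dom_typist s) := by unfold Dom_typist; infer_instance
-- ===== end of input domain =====

-- B replaces A's running caps-state machine by a closed form over uppercase runs: #cased + 2*#upper_runs - (ends-uppercase) (alternative decomposition, same cost).

-- ===== PORT A =====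
-- A's loop: state = (capslock_state, click), branches in A's order.
def typistLoop : List Char → Bool → Int → Int
  | [], _, click => click
  | c :: rest, caps, click =>
    if PySem.Chars.islower c then
      if caps = false then typistLoop rest caps (click + 1)
      else typistLoop rest false (click + 2)
    else if PySem.Chars.isupper c then
      if caps = false then typistLoop rest true (click + 2)
      else typistLoop rest caps (click + 1)
    else typistLoop rest caps click

def typist (s : String) : Int := typistLoop s.toList false 0

-- ===== PORT B =====
-- up = [c.isupper() for c in s if c.islower() or c.isupper()]
def typistUp (s : String) : List Bool :=
  (s.toList.filter (fun c => PySem.Chars.islower c || PySem.Chars.isupper c)).map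
    (fun c => PySem.Chars.isupper c)

-- upruns = sum(1 for prev, cur in zip([False] + up, up) if cur and not prev)
def typist_alt (s : String) : Int :=
  let up := typistUp s
  let upruns : Int := ((List.zip (false :: up) up).countP (fun pc => pc.2 && !pc.1) : Int)
  (up.length : Int) + 2 * upruns - (if up.getLastD false then 1 else 0)

-- ===== PRECONDITION & SPEC =====
def Spec_typist (s : String) (out : Int) : Prop := out = typist_alt s
instance (s : String) (out : Int) : Decidable (Spec_typist s out) := by unfold Spec_typist; infer_instance

-- ===== CLAIM (what is proved, stated in full; the proofs are below) =====
def Claim_equal_typist : Prop := ∀ (s : String), Dom_typist s → Spec_typist s (typist s)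

-- ===== LEMMAS AND PROOFS =====

-- number of caps-state transitions from a previous state through the desired states
def pvTrans : Bool → List Bool → Int
  | _, [] => 0
  | p, b :: bs => (if b ≠ p then 1 else 0) + pvTrans b bs

-- number of uppercase-run starts, given the previous state
def pvZ : Bool → List Bool → Int
  | _, [] => 0
  | p, b :: bs => (if b && !p then 1 else 0) + pvZ b bs

def pvStatesOf (xs : List Char) : List Bool :=
  (xs.filter (fun c => PySem.Chars.islower c || PySem.Chars.isupper c)).map
    (fun c => PySem.Chars.isupper c)

theorem pvCountP_zip (p : Bool) (bs : List Bool) :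
    ((List.zip (p :: bs) bs).countP (fun pc => pc.2 && !pc.1) : Int) = pvZ p bs := by
  induction bs generalizing p with
  | nil => simp [pvZ]
  | cons b bs ih =>
    simp only [List.zip_cons_cons, List.countP_cons, pvZ, ← ih b]
    by_cases h : (b && !p) = true <;> simp [h] <;> ring

theorem pvTrans_eq (bs : List Bool) (p : Bool) :
    pvTrans p bs = 2 * pvZ p bs - (if bs.getLastD p then 1 else 0) + (if p then 1 else 0) := by
  induction bs generalizing p with
  | nil => simp [pvTrans, pvZ]
  | cons b bs ih =>
    simp only [pvTrans, pvZ, ih b, List.getLastD_cons]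
    cases p <;> cases b <;> simp <;> ring

theorem pvLoop_eq (xs : List Char) (caps : Bool) (click : Int) :
    typistLoop xs caps click
      = click + ((pvStatesOf xs).length : Int) + pvTrans caps (pvStatesOf xs) := by
  induction xs generalizing caps click with
  | nil => simp [typistLoop, pvStatesOf, pvTrans]
  | cons c rest ih =>
    by_cases hl : PySem.Chars.islower c
    · have hu : PySem.Chars.isupper c = false := by
        cases hc : PySem.Chars.isupper c
        · rfl
        · exfalso
          simp [PySem.Chars.islower, PySem.Chars.isupper] at hl hc
          exact absurd (hc.2) (not_le.mpr (lt_of_lt_of_le (by decide) hl.1))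
      cases caps <;>
        simp [typistLoop, hl, pvStatesOf, hu, pvTrans, ih] <;> ring
    · by_cases hu : PySem.Chars.isupper c
      · cases caps <;>
          simp [typistLoop, hl, hu, pvStatesOf, pvTrans, ih] <;> ring
      · simp [typistLoop, hl, hu, pvStatesOf, ih]

-- ===== VERDICT (by name: the statement is the Claim_ definition above) =====
theorem typist_spec : Claim_equal_typist := by
  intro s _
  unfold Spec_typist typist typist_alt
  have hst : typistUp s = pvStatesOf s.toList := rfl
  simp only [hst, pvCountP_zip, pvLoop_eq, pvTrans_eq]
  simp
  ring
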